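-- pv_equiv track=rewrite | github.com/mindspore-ai/toolkits | troubleshooter/troubleshooter/migrator/save/base_saver.py | _remove_npy_extension
-- ===== SOURCE A (Python) =====
-- def _remove_npy_extension(file_name):
--     has_extension = False
--     extension = ""
--     file_name_without_extension = ""
--
--     for char in file_name:
--         if char == ".":
--             file_name_without_extension += extension
--             has_extension = True
--             extension = "."
--         elif has_extension:
--             extension += char
--         else:
--             file_name_without_extension += char
--
--     if extension == ".npy":
--         return file_name_without_extension
--     else:
--         return file_name
-- ===== SOURCE B (Python) =====
-- def _remove_npy_extension(file_name):
--     # A ".npy" suffix necessarily sits after the last dot, so a single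
--     # suffix test replaces A's char-by-char accumulator loop.
--     return file_name[:-4] if file_name.endswith(".npy") else file_name
-- ===== Notes on version B (the rewrite author's own statement) =====
-- stated objective: simpler
-- what changed: Replaces the three-accumulator character loop with a single endswith('.npy') test and a [:-4] slice.
import Mathlib
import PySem

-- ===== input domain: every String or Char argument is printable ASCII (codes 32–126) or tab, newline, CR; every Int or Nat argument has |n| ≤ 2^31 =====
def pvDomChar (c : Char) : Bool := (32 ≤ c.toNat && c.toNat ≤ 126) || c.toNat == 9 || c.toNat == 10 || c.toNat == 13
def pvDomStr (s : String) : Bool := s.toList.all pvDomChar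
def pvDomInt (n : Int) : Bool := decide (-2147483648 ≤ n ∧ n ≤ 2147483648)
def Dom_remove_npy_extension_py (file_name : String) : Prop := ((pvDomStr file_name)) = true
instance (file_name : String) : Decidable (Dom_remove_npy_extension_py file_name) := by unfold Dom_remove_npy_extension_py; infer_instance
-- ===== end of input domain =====

-- B replaces A's three-accumulator character loop by a single endswith(".npy") test
-- plus a [:-4] slice (objective: simpler).

-- ===== PORT A =====
-- loop body of A: state = (has_extension, extension, file_name_without_extension)
def pvLoopA (st : Bool × List Char × List Char) (c : Char) : Bool × List Char × List Char :=
  if c = '.' then (true, ['.'], st.2.2 ++ st.2.1)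
  else if st.1 then (st.1, st.2.1 ++ [c], st.2.2)
  else (st.1, st.2.1, st.2.2 ++ [c])

def remove_npy_extension_py (file_name : String) : String :=
  let st := file_name.toList.foldl pvLoopA (false, [], [])
  if st.2.1 = ['.', 'n', 'p', 'y'] then String.ofList st.2.2 else file_name

-- ===== PORT B =====
def remove_npy_extension_py_alt (file_name : String) : String :=
  if PySem.Str.endswith file_name ".npy" then PySem.Str.slice file_name none (some (-4))
  else file_name

-- ===== PRECONDITION & SPEC =====
def Spec_remove_npy_extension_py (file_name : String) (out : String) : Prop := out = remove_npy_extension_py_alt file_name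
instance (file_name : String) (out : String) : Decidable (Spec_remove_npy_extension_py file_name out) := by unfold Spec_remove_npy_extension_py; infer_instance

-- ===== CLAIM (what is proved, stated in full; the proofs are below) =====
def Claim_equal_remove_npy_extension_py : Prop := ∀ (file_name : String), Dom_remove_npy_extension_py file_name → Spec_remove_npy_extension_py file_name (remove_npy_extension_py file_name)

-- ===== LEMMAS AND PROOFS =====

-- A's loop invariant: fnwe ++ extension reassembles the input; before any dot the
-- extension is empty and the input is dot-free; after a dot the extension is '.'
-- followed by a dot-free tail (the segment after the LAST dot seen so far).
lemma pvLoopA_inv (cs : List Char) :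
    (cs.foldl pvLoopA (false, [], [])).2.2 ++ (cs.foldl pvLoopA (false, [], [])).2.1 = cs ∧
    ((cs.foldl pvLoopA (false, [], [])).1 = false →
      (cs.foldl pvLoopA (false, [], [])).2.1 = [] ∧ '.' ∉ cs) ∧
    ((cs.foldl pvLoopA (false, [], [])).1 = true →
      ∃ rest, (cs.foldl pvLoopA (false, [], [])).2.1 = '.' :: rest ∧ '.' ∉ rest) := by
  induction cs using List.reverseRecOn with
  | nil => simp
  | append_singleton cs c ih =>
    set st := cs.foldl pvLoopA (false, [], []) with hst
    obtain ⟨h1, h2, h3⟩ := ih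
    rw [List.foldl_append]
    simp only [List.foldl_cons, List.foldl_nil, ← hst]
    unfold pvLoopA
    split_ifs with hc hh
    · subst hc
      refine ⟨by simp [← h1], by simp, fun _ => ⟨[], rfl, by simp⟩⟩
    · obtain ⟨rest, hr, hnr⟩ := h3 hh
      refine ⟨by simp [← h1], by simp [hh], fun _ => ⟨rest ++ [c], by simp [hr], ?_⟩⟩
      simp [hnr, Ne.symm hc]
    · rw [Bool.not_eq_true] at hh
      obtain ⟨he, hnd⟩ := h2 hh
      refine ⟨by simp [← h1, he], fun _ => ⟨he, ?_⟩, by simp [hh]⟩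
      simp [hnd, Ne.symm hc]

-- A's final extension equals ".npy" exactly when the input ends with ".npy"
lemma pvExt_eq_iff (cs : List Char) :
    (cs.foldl pvLoopA (false, [], [])).2.1 = ['.', 'n', 'p', 'y'] ↔
      ['.', 'n', 'p', 'y'] <:+ cs := by
  obtain ⟨h1, h2, h3⟩ := pvLoopA_inv cs
  constructor
  · intro h
    exact ⟨(cs.foldl pvLoopA (false, [], [])).2.2, by rw [← h, h1]⟩
  · intro hsuf
    by_contra hne
    have hextsuf : (cs.foldl pvLoopA (false, [], [])).2.1 <:+ cs :=
      ⟨(cs.foldl pvLoopA (false, [], [])).2.2, h1⟩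
    cases hb : (cs.foldl pvLoopA (false, [], [])).1 with
    | false =>
      obtain ⟨_, hnd⟩ := h2 hb
      exact hnd (hsuf.subset (by simp))
    | true =>
      obtain ⟨rest, hr, hnr⟩ := h3 hb
      rcases List.suffix_or_suffix_of_suffix hextsuf hsuf with h | h
      · -- the extension is a suffix of ".npy" but not equal to it
        obtain ⟨t, ht⟩ := h
        rw [hr] at ht hne
        rcases t with _ | ⟨a, _ | ⟨b, _ | ⟨d, _ | ⟨e, t⟩⟩⟩⟩ <;> simp_all
      · -- ".npy" is a proper suffix of the extension: rest would contain a dot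
        obtain ⟨t, ht⟩ := h
        rw [hr] at ht hne
        rcases t with _ | ⟨a, t⟩
        · simp_all
        · have hm : '.' ∈ rest := by
            cases ht
            exact List.mem_append.mpr (Or.inr (by simp))
          exact hnr hm

-- ===== VERDICT (by name: the statement is the Claim_ definition above) =====
theorem remove_npy_extension_py_spec : Claim_equal_remove_npy_extension_py := by
  intro file_name _
  unfold Spec_remove_npy_extension_py remove_npy_extension_py remove_npy_extension_py_alt
  obtain ⟨h1, _, _⟩ := pvLoopA_inv file_name.toList
  have hiff := pvExt_eq_iff file_name.toList
  have hend : PySem.Str.endswith file_name ".npy" =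
      PySem.Chars.endswith file_name.toList ['.', 'n', 'p', 'y'] := by
    simp [PySem.Str.endswith_eq]
  by_cases h : (file_name.toList.foldl pvLoopA (false, [], [])).2.1 = ['.', 'n', 'p', 'y']
  · have hend' : PySem.Str.endswith file_name ".npy" = true := by
      rw [hend]; exact (PySem.Chars.endswith_iff _ _).mpr (hiff.mp h)
    rw [if_pos h, if_pos (by rw [hend'])]
    have hsl : PySem.Str.slice file_name none (some (-4)) =
        String.ofList (file_name.toList.take (file_name.toList.length - 4)) := by
      simp only [PySem.Str.slice, PySem.Chars.slice_eq_listSlice,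
        PySem.List.slice_to_neg_ofNat file_name.toList 4 (by omega)]
    rw [hsl]
    have hlen : (file_name.toList.foldl pvLoopA (false, [], [])).2.2.length + 4 =
        file_name.toList.length := by
      conv_rhs => rw [← h1]
      simp [h]
    congr 1
    conv_rhs => rw [← h1, h]
    rw [List.take_left' (by simp)]
  · have hend' : PySem.Str.endswith file_name ".npy" = false := by
      rw [hend, Bool.eq_false_iff]
      intro he
      exact h (hiff.mpr ((PySem.Chars.endswith_iff _ _).mp he))
    rw [if_neg h, if_neg (by rw [hend']; simp)]
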